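-- pv_equiv track=rewrite | github.com/tenstorrent/tt-forge-fe | forge/test/galaxy/bert/squad_preprocessing/helpers/data_processing.py | convert_doc_tokens
-- ===== SOURCE A (Python) =====
-- def convert_doc_tokens(paragraph_text):
--     """ Return the list of tokens from the doc text """
--     def is_whitespace(c):
--         if c == " " or c == "\t" or c == "\r" or c == "\n" or ord(c) == 0x202F:
--             return True
--         return False
--
--     doc_tokens = []
--     char_to_word_offset = []
--     prev_is_whitespace = True
--     for c in paragraph_text:
--         if is_whitespace(c):
--             prev_is_whitespace = True
--         else:
--             if prev_is_whitespace:
--                 doc_tokens.append(c)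
--             else:
--                 doc_tokens[-1] += c
--             prev_is_whitespace = False
--         char_to_word_offset.append(len(doc_tokens) - 1)
--
--     return doc_tokens, char_to_word_offset
-- ===== SOURCE B (Python) =====
-- def convert_doc_tokens(paragraph_text):
--     """ Return the list of tokens from the doc text """
--     whitespace = " \t\r\n\u202f"
--     n = len(paragraph_text)
--     # pass 1: collect (start, end) spans of maximal non-whitespace runs
--     spans = []
--     i = 0
--     while i < n:
--         if paragraph_text[i] in whitespace:
--             i += 1
--         else:
--             j = i + 1
--             while j < n and paragraph_text[j] not in whitespace:
--                 j += 1
--             spans.append((i, j))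
--             i = j
--     doc_tokens = [paragraph_text[a:b] for a, b in spans]
--     # pass 2: char p gets index of last token starting at or before p, else -1
--     starts = [a for a, _ in spans]
--     char_to_word_offset = [-1] * (starts[0] if spans else n)
--     for k, a in enumerate(starts):
--         nxt = starts[k + 1] if k + 1 < len(starts) else n
--         char_to_word_offset += [k] * (nxt - a)
--     return doc_tokens, char_to_word_offset
-- ===== Notes on version B (the rewrite author's own statement) =====
-- stated objective: faster
-- what changed: Replaces A's interleaved char-by-char state machine (which grows each token with repeated str +=) with a two-pass decomposition: first collect (start,end) spans of maximal non-whitespace runs, then build the tokens by slicing and the offset map by concatenating constant blocks between consecutive token starts.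
import Mathlib
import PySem

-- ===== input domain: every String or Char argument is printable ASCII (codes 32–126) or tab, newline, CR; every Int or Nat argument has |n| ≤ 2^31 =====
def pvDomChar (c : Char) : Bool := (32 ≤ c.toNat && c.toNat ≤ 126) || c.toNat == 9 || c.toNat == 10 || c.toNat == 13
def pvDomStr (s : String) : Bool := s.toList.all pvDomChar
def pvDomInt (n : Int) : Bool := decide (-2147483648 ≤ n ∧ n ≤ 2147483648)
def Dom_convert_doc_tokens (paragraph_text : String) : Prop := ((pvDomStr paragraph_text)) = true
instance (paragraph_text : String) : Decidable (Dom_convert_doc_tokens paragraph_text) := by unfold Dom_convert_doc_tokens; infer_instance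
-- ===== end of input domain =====

-- B replaces A's interleaved char-by-char state machine (repeated str += per char)
-- with a tokenize-then-map decomposition: collect non-whitespace spans, then slice the
-- tokens and emit the offset map as constant blocks; measurably faster on long tokens.


-- ===== PORT A =====
-- Python str values are modelled as List Char (PySem.Chars style); tokens are wrapped
-- with String.mk at the very end.
def pvIsWs (c : Char) : Bool :=
  c == ' ' || c == '\t' || c == '\r' || c == '\n' || c.toNat == 0x202F

-- one iteration of A's for-loop; state = (doc_tokens, char_to_word_offset, prev_is_whitespace)
def aStep (st : List (List Char) × List Int × Bool) (c : Char) :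
    List (List Char) × List Int × Bool :=
  if pvIsWs c then
    (st.1, st.2.1 ++ [(st.1.length : Int) - 1], true)
  else if st.2.2 then
    (st.1 ++ [[c]], st.2.1 ++ [((st.1 ++ [[c]]).length : Int) - 1], false)
  else
    -- doc_tokens[-1] += c
    (st.1.dropLast ++ [st.1.getLastD [] ++ [c]],
     st.2.1 ++ [(st.1.length : Int) - 1], false)

def convert_doc_tokens (paragraph_text : String) : List String × List Int :=
  let r := paragraph_text.toList.foldl aStep ([], [], true)
  (r.1.map String.mk, r.2.1)

-- ===== PORT B =====
def pvNotWs (c : Char) : Bool := !pvIsWs c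

-- pass 1 of Source B: spans (i, j) of maximal non-whitespace runs (the inner while-loop
-- scan is the takeWhile/dropWhile of the run)
def bSpans : List Char → Nat → List (Nat × Nat)
  | [], _ => []
  | c :: r, pos =>
    if pvIsWs c then bSpans r (pos + 1)
    else
      let j := pos + 1 + (r.takeWhile pvNotWs).length
      (pos, j) :: bSpans (r.dropWhile pvNotWs) j
termination_by cs _ => cs.length
decreasing_by
  · simp
  · exact Nat.lt_succ_of_le (List.Sublist.length_le (List.dropWhile_sublist _))

-- pass 2 of Source B: the offset blocks [k] * (next_start - start)
def bOffs : List Nat → Nat → Nat → List Int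
  | [], _, _ => []
  | a :: rest, k, n => List.replicate (rest.headD n - a) (k : Int) ++ bOffs rest (k + 1) n

def convert_doc_tokens_alt (paragraph_text : String) : List String × List Int :=
  let cs := paragraph_text.toList
  let n := cs.length
  let spans := bSpans cs 0
  let doc_tokens := spans.map (fun ab => String.mk ((cs.drop ab.1).take (ab.2 - ab.1)))
  let starts := spans.map Prod.fst
  let offsets := List.replicate (starts.headD n) (-1 : Int) ++ bOffs starts 0 n
  (doc_tokens, offsets)

-- ===== PRECONDITION & SPEC =====
def Spec_convert_doc_tokens (paragraph_text : String) (out : List String × List Int) : Prop := out = convert_doc_tokens_alt paragraph_text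
instance (paragraph_text : String) (out : List String × List Int) : Decidable (Spec_convert_doc_tokens paragraph_text out) := by unfold Spec_convert_doc_tokens; infer_instance

-- ===== CLAIM (what is proved, stated in full; the proofs are below) =====
def Claim_equal_convert_doc_tokens : Prop := ∀ (paragraph_text : String), Dom_convert_doc_tokens paragraph_text → Spec_convert_doc_tokens paragraph_text (convert_doc_tokens paragraph_text)

-- ===== LEMMAS AND PROOFS =====

-- reference tokenization: the maximal non-whitespace runs of cs, as char lists
def Ttok : List Char → List (List Char)
  | [] => []
  | c :: r =>
    if pvIsWs c then Ttok r
    else (c :: r.takeWhile pvNotWs) :: Ttok (r.dropWhile pvNotWs)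
termination_by cs => cs.length
decreasing_by
  · simp
  · exact Nat.lt_succ_of_le (List.Sublist.length_le (List.dropWhile_sublist _))

-- reference offsets: m tokens already seen; ws char ↦ m-1, chars of next run ↦ m, …
def Ooff : List Char → Nat → List Int
  | [], _ => []
  | c :: r, m =>
    if pvIsWs c then ((m : Int) - 1) :: Ooff r m
    else ((m : Int) :: List.replicate (r.takeWhile pvNotWs).length (m : Int))
          ++ Ooff (r.dropWhile pvNotWs) (m + 1)
termination_by cs _ => cs.length
decreasing_by
  · simp
  · exact Nat.lt_succ_of_le (List.Sublist.length_le (List.dropWhile_sublist _))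

-- A's fold, characterised by Ttok/Ooff, simultaneously for both values of the prev flag
lemma A_main : ∀ (N : Nat) (cs : List Char), cs.length ≤ N →
    ((∀ ts offs,
        (List.foldl aStep (ts, offs, true) cs).1 = ts ++ Ttok cs ∧
        (List.foldl aStep (ts, offs, true) cs).2.1 = offs ++ Ooff cs ts.length) ∧
     (∀ ts t offs,
        (List.foldl aStep (ts ++ [t], offs, false) cs).1
          = ts ++ ((t ++ cs.takeWhile pvNotWs) :: Ttok (cs.dropWhile pvNotWs)) ∧
        (List.foldl aStep (ts ++ [t], offs, false) cs).2.1
          = offs ++ List.replicate (cs.takeWhile pvNotWs).length (ts.length : Int)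
              ++ Ooff (cs.dropWhile pvNotWs) (ts.length + 1))) := by
  intro N
  induction N with
  | zero =>
    intro cs h
    have : cs = [] := List.eq_nil_of_length_eq_zero (Nat.le_zero.mp h)
    subst this
    constructor
    · intro ts offs; simp [Ttok, Ooff]
    · intro ts t offs; simp [Ttok, Ooff]
  | succ n ih =>
    intro cs h
    cases cs with
    | nil =>
      constructor
      · intro ts offs; simp [Ttok, Ooff]
      · intro ts t offs; simp [Ttok, Ooff]
    | cons c r =>
      have hr : r.length ≤ n := by simpa using h
      have hdrop : (r.dropWhile pvNotWs).length ≤ n :=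
        Nat.le_trans (List.Sublist.length_le (List.dropWhile_sublist _)) hr
      constructor
      · intro ts offs
        by_cases hw : pvIsWs c
        · have := (ih r hr).1 ts (offs ++ [(ts.length : Int) - 1])
          simp only [List.foldl_cons, aStep, hw, if_pos]
          refine ⟨by simpa [Ttok, hw] using this.1, ?_⟩
          rw [this.2]
          simp [Ooff, hw]
        · have := (ih r hr).2 ts [c] (offs ++ [(ts.length : Int)])
          simp only [List.foldl_cons, aStep, hw, Bool.false_eq_true, if_false, if_pos,
            List.length_append, List.length_cons, List.length_nil]
          constructor
          · simpa [Ttok, hw] using this.1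
          · rw [show ((ts.length + (0 + 1) : Nat) : Int) - 1 = (ts.length : Int)
                  from by push_cast; ring]
            rw [this.2]
            simp [Ooff, hw]
      · intro ts t offs
        by_cases hw : pvIsWs c
        · have := (ih r hr).1 (ts ++ [t]) (offs ++ [((ts ++ [t]).length : Int) - 1])
          simp only [List.foldl_cons, aStep, hw, if_pos]
          constructor
          · rw [this.1]
            simp [Ttok, List.takeWhile_cons, List.dropWhile_cons, pvNotWs, hw]
          · rw [this.2]
            simp only [List.length_append, List.length_cons, List.length_nil]
            rw [show ((ts.length + (0 + 1) : Nat) : Int) - 1 = (ts.length : Int)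
                  from by push_cast; ring]
            simp [Ooff, pvNotWs, hw]
        · have := (ih r hr).2 ts (t ++ [c]) (offs ++ [((ts ++ [t]).length : Int) - 1])
          have hstate : (ts ++ [t]).dropLast ++ [(ts ++ [t]).getLastD [] ++ [c]]
              = ts ++ [t ++ [c]] := by
            rw [List.dropLast_concat, List.getLastD_concat]
          simp only [List.foldl_cons, aStep, hw, Bool.false_eq_true, if_false]
          rw [hstate]
          constructor
          · rw [this.1]
            simp [Ttok, List.takeWhile_cons, List.dropWhile_cons, pvNotWs, hw]
          · rw [this.2]
            simp only [List.length_append, List.length_cons, List.length_nil]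
            rw [show ((ts.length + (0 + 1) : Nat) : Int) - 1 = (ts.length : Int)
                  from by push_cast; ring]
            simp [pvNotWs, hw, List.replicate_succ, List.append_assoc]

lemma take_length_takeWhile (p : Char → Bool) : ∀ (l : List Char),
    l.take (l.takeWhile p).length = l.takeWhile p := by
  intro l
  induction l with
  | nil => simp
  | cons c r ih =>
    by_cases h : p c
    · simp [h, ih]
    · simp [h]

-- B's span tokens are Ttok
lemma B_toks : ∀ (N : Nat) (cs : List Char), cs.length ≤ N → ∀ (pre : List Char),
    (bSpans cs pre.length).map (fun ab => ((pre ++ cs).drop ab.1).take (ab.2 - ab.1))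
      = Ttok cs := by
  intro N
  induction N with
  | zero =>
    intro cs h pre
    have : cs = [] := List.eq_nil_of_length_eq_zero (Nat.le_zero.mp h)
    subst this; simp [bSpans, Ttok]
  | succ n ih =>
    intro cs h pre
    cases cs with
    | nil => simp [bSpans, Ttok]
    | cons c r =>
      have hr : r.length ≤ n := by simpa using h
      by_cases hw : pvIsWs c
      · have := ih r hr (pre ++ [c])
        simp only [List.length_append, List.length_cons, List.length_nil,
          List.append_assoc, List.cons_append, List.nil_append] at this
        simpa [bSpans, Ttok, hw] using this
      · have hdrop : (r.dropWhile pvNotWs).length ≤ n :=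
          Nat.le_trans (List.Sublist.length_le (List.dropWhile_sublist _)) hr
        have htl := ih (r.dropWhile pvNotWs) hdrop (pre ++ c :: r.takeWhile pvNotWs)
        simp only [List.length_append, List.length_cons,
          List.append_assoc, List.cons_append] at htl
        rw [List.takeWhile_append_dropWhile] at htl
        simp only [bSpans, Ttok, hw, if_neg, Bool.false_eq_true, not_false_iff,
          List.map_cons]
        congr 1
        · have : pre.length + 1 + (r.takeWhile pvNotWs).length - pre.length
              = (r.takeWhile pvNotWs).length + 1 := by omega
          rw [this]
          rw [show pre ++ c :: r = pre ++ (c :: r) from rfl, List.drop_left']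
          · simp [take_length_takeWhile]
          · rfl
        · convert htl using 3
          omega

-- every start produced by bSpans (and the default) is ≥ pos
lemma bSpans_first_ge : ∀ (N : Nat) (cs : List Char), cs.length ≤ N → ∀ pos,
    pos ≤ (((bSpans cs pos).map Prod.fst).headD (pos + cs.length)) := by
  intro N
  induction N with
  | zero =>
    intro cs h pos
    have : cs = [] := List.eq_nil_of_length_eq_zero (Nat.le_zero.mp h)
    subst this; simp [bSpans]
  | succ n ih =>
    intro cs h pos
    cases cs with
    | nil => simp [bSpans]
    | cons c r =>
      by_cases hw : pvIsWs c
      · have := ih r (by simpa using Nat.lt_succ_iff.mp (Nat.lt_of_lt_of_le (by simp) h)) (pos + 1)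
        calc pos ≤ pos + 1 := by omega
          _ ≤ _ := by
              simpa [bSpans, hw, Nat.add_assoc, Nat.add_comm, Nat.add_left_comm] using this
      · simp [bSpans, hw]

-- B's offset blocks are Ooff
lemma B_offs : ∀ (N : Nat) (cs : List Char), cs.length ≤ N → ∀ (pos k : Nat),
    List.replicate ((((bSpans cs pos).map Prod.fst).headD (pos + cs.length)) - pos)
        ((k : Int) - 1)
      ++ bOffs ((bSpans cs pos).map Prod.fst) k (pos + cs.length)
      = Ooff cs k := by
  intro N
  induction N with
  | zero =>
    intro cs h pos k
    have : cs = [] := List.eq_nil_of_length_eq_zero (Nat.le_zero.mp h)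
    subst this; simp [bSpans, bOffs, Ooff]
  | succ n ih =>
    intro cs h pos k
    cases cs with
    | nil => simp [bSpans, bOffs, Ooff]
    | cons c r =>
      have hr : r.length ≤ n := by simpa using h
      by_cases hw : pvIsWs c
      · have hge := bSpans_first_ge n r hr (pos + 1)
        have hih := ih r hr (pos + 1) k
        simp only [bSpans, Ooff, hw, if_pos, List.length_cons]
        rw [show pos + (r.length + 1) = pos + 1 + r.length from by omega]
        rw [show (((bSpans r (pos + 1)).map Prod.fst).headD (pos + 1 + r.length)) - pos
              = ((((bSpans r (pos + 1)).map Prod.fst).headD (pos + 1 + r.length)) - (pos + 1)) + 1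
            from by omega]
        rw [List.replicate_succ, List.cons_append, hih]
      · have hlen : (r.takeWhile pvNotWs).length + (r.dropWhile pvNotWs).length = r.length := by
          have h2 := congrArg List.length (List.takeWhile_append_dropWhile (p := pvNotWs) (l := r))
          simp only [List.length_append] at h2
          exact h2
        have hdrop : (r.dropWhile pvNotWs).length ≤ n :=
          Nat.le_trans (List.Sublist.length_le (List.dropWhile_sublist _)) hr
        have hih := ih (r.dropWhile pvNotWs) hdrop
          (pos + 1 + (r.takeWhile pvNotWs).length) (k + 1)
        have hge := bSpans_first_ge n (r.dropWhile pvNotWs) hdrop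
          (pos + 1 + (r.takeWhile pvNotWs).length)
        rw [show pos + 1 + (r.takeWhile pvNotWs).length + (r.dropWhile pvNotWs).length
              = pos + (r.length + 1) from by omega] at hih hge
        rw [show ((k + 1 : Nat) : Int) - 1 = (k : Int) from by push_cast; ring] at hih
        simp only [bSpans, Ooff, hw, Bool.false_eq_true, if_false, List.map_cons,
          List.length_cons, List.headD_cons, Nat.sub_self, List.replicate_zero,
          List.nil_append, bOffs]
        rw [← hih]
        set h' := (((bSpans (r.dropWhile pvNotWs)
              (pos + 1 + (r.takeWhile pvNotWs).length)).map Prod.fst).headD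
              (pos + (r.length + 1))) with hh'
        rw [show h' - pos = ((r.takeWhile pvNotWs).length + 1)
              + (h' - (pos + 1 + (r.takeWhile pvNotWs).length)) from by omega]
        rw [List.replicate_add, List.replicate_succ]
        simp only [List.cons_append]
        rw [List.append_assoc]

-- ===== VERDICT (by name: the statement is the Claim_ definition above) =====
theorem convert_doc_tokens_spec : Claim_equal_convert_doc_tokens := by
  intro s _
  unfold Spec_convert_doc_tokens convert_doc_tokens convert_doc_tokens_alt
  have hA := (A_main s.toList.length s.toList (Nat.le_refl _)).1 [] []
  simp only [List.length_nil, List.nil_append] at hA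
  have hT := B_toks s.toList.length s.toList (Nat.le_refl _) []
  simp only [List.length_nil, List.nil_append] at hT
  have hO := B_offs s.toList.length s.toList (Nat.le_refl _) 0 0
  simp only [Nat.zero_add, Nat.sub_zero, Nat.cast_zero, zero_sub] at hO
  refine Prod.ext ?_ ?_
  · show (List.foldl aStep ([], [], true) s.toList).1.map String.mk = _
    rw [hA.1, ← hT, List.map_map]
    rfl
  · show (List.foldl aStep ([], [], true) s.toList).2.1 = _
    rw [hA.2, ← hO]
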